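-- pv_equiv track=rewrite | github.com/vuthanhdat2k3/KnowledgeGrapDocumetAnalyzer | src/core/markdown_chunker/docx_markdown_chunker.py | _get_effective_chunk_level
-- ===== SOURCE A (Python) =====
-- from typing import List, Dict, Any, Optional, Tuple
--
-- def _get_effective_chunk_level(chunk: Dict[str, Any], original_level: int, hierarchy: tuple) -> int:
--     """
--     Determine the effective level of a chunk by analyzing its content.
--     If a chunk contains parent headers with no content between them and child headers,
--     the effective level should be the parent level.
--
--     Returns the effective level of the chunk.
--     """
--     if original_level <= 1:
--         return original_level
--
--     content = chunk['content']
--     lines = content.split('\n')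
--
--     # Find all header lines in the content
--     header_lines = []
--     for i, line in enumerate(lines):
--         line_stripped = line.strip()
--         if line_stripped.startswith('#'):
--             # Count the number of # characters
--             header_level = 0
--             for char in line_stripped:
--                 if char == '#':
--                     header_level += 1
--                 else:
--                     break
--
--             # Extract header text
--             header_text = line_stripped[header_level:].strip()
--             header_lines.append({
--                 'level': header_level,
--                 'text': header_text,
--                 'line_index': i
--             })
--
--     if len(header_lines) <= 1:
--         return original_level
--
--     # Check if headers are nested without content between them
--     for i in range(len(header_lines) - 1):
--         current_header = header_lines[i]
--         next_header = header_lines[i + 1]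
--
--         # Check if there's meaningful content between headers
--         start_line = current_header['line_index'] + 1
--         end_line = next_header['line_index']
--
--         has_meaningful_content = False
--         for line_idx in range(start_line, end_line):
--             if line_idx < len(lines):
--                 line_content = lines[line_idx].strip()
--                 # Ignore empty lines, horizontal rules, and simple formatting
--                 if (line_content and
--                     not line_content.startswith('---') and
--                     not line_content.startswith('===') and
--                     line_content != ''):
--                     has_meaningful_content = True
--                     break
--
--         # If no meaningful content between parent and child header,
--         # the effective level should be the parent level
--         if (not has_meaningful_content and
--             current_header['level'] < next_header['level'] and
--             current_header['level'] == original_level - 1):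
--
--             return current_header['level']
--
--     return original_level
-- ===== SOURCE B (Python) =====
-- from typing import List, Dict, Any, Optional, Tuple
--
-- def _get_effective_chunk_level(chunk: Dict[str, Any], original_level: int, hierarchy: tuple) -> int:
--     """Single pass over the lines, keeping only the previous header and whether
--     meaningful content was seen since it; no header list is materialized."""
--     if original_level <= 1:
--         return original_level
--
--     prev_level = None          # level of the last header seen, if any
--     seen_content = False       # meaningful content since that header?
--     for line in chunk['content'].split('\n'):
--         s = line.strip()
--         if s.startswith('#'):
--             lvl = next((i for i, c in enumerate(s) if c != '#'), len(s))
--             if (prev_level is not None and not seen_content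
--                     and prev_level < lvl and prev_level == original_level - 1):
--                 return prev_level
--             prev_level = lvl
--             seen_content = False
--         elif s and not s.startswith('---') and not s.startswith('==='):
--             seen_content = True
--     return original_level
-- ===== Notes on version B (the rewrite author's own statement) =====
-- stated objective: simpler
-- what changed: A materializes a list of all header records and then scans consecutive pairs, re-scanning the line range between each pair for meaningful content; B makes a single pass over the lines keeping only the previous header's level and a seen-meaningful-content flag.
import Mathlib
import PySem

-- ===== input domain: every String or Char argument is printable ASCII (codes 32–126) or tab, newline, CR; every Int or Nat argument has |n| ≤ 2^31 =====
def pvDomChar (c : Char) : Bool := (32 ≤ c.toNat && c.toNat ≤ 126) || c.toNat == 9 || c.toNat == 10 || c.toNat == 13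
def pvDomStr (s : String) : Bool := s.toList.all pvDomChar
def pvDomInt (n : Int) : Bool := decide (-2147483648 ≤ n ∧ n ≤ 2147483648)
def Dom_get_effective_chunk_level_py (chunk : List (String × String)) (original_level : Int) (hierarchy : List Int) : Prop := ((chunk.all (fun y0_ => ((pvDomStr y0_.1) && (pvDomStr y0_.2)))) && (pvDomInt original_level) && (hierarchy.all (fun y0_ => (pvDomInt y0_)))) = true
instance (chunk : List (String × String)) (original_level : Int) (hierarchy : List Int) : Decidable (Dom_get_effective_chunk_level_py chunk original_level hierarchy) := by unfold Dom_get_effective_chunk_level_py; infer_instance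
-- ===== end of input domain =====

-- B replaces A's two-phase "collect all headers, then scan consecutive pairs with index-range content checks"
-- by a single pass over the lines keeping only the previous header's level and a seen-content flag (objective: simpler).

-- chunk['content']: first-match lookup in the association list (shared by both ports)
def pvLookup : List (String × String) → String → Option String
  | [], _ => none
  | (k, v) :: rest, key => if k == key then some v else pvLookup rest key

-- ===== PORT A =====
-- meaningful-content test A applies to a line between two headers (strips, then the three checks, in A's order)
def pvMeaningA (line : String) : Bool :=
  let c := PySem.Str.strip line
  (c != "") && !(PySem.Str.startswith c "---") && !(PySem.Str.startswith c "===") && (c != "")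

-- A's inner loop "for line_idx in range(start_line, end_line): if line_idx < len(lines): …" with break on first hit
def pvHasMeaningful (lines : List String) (a b : Nat) : Bool :=
  (List.range' a (b - a)).any (fun idx => decide (idx < lines.length) && pvMeaningA (lines.getD idx ""))

-- A's '#'-counting loop: length of the leading-'#' run of the stripped line
def pvLvlA (s : String) : Nat := (s.toList.takeWhile (fun c => c == '#')).length
-- header_text = line_stripped[header_level:].strip() (index ≥ 0, so the slice is drop; exact)
def pvTxtA (s : String) : String := PySem.Str.strip (String.ofList (s.toList.drop (pvLvlA s)))

-- A's "for i, line in enumerate(lines)" collecting header records (level, text, line_index);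
-- the '#'-counting loop is the leading-'#' run, s[header_level:].strip() is drop-then-strip (index ≥ 0, exact)
def pvCollect (i0 : Nat) : List String → List (Nat × String × Nat)
  | [] => []
  | line :: rest =>
    let s := PySem.Str.strip line
    if PySem.Str.startswith s "#" then
      (pvLvlA s, pvTxtA s, i0) :: pvCollect (i0 + 1) rest
    else pvCollect (i0 + 1) rest

-- A's "for i in range(len(header_lines) - 1)" over consecutive header pairs, returning on the first match
def pvPairLoop (lines : List String) (o : Int) : List (Nat × String × Nat) → Int
  | h1 :: h2 :: rest =>
    if !(pvHasMeaningful lines (h1.2.2 + 1) h2.2.2) && decide (h1.1 < h2.1) && decide ((h1.1 : Int) = o - 1)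
    then (h1.1 : Int)
    else pvPairLoop lines o (h2 :: rest)
  | _ => o

def get_effective_chunk_level_py (chunk : List (String × String)) (original_level : Int) (hierarchy : List Int) : Int :=
  if original_level ≤ 1 then original_level
  else
    let content := (pvLookup chunk "content").getD ""   -- Pre_ guarantees the key is present
    let lines := (PySem.Str.split? content "\n").getD []  -- sep ≠ "", split? is some
    let hs := pvCollect 0 lines
    if hs.length ≤ 1 then original_level
    else pvPairLoop lines original_level hs

-- ===== PORT B =====
def pvMeaningB (c : String) : Bool :=
  (c != "") && !(PySem.Str.startswith c "---") && !(PySem.Str.startswith c "===")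

-- next((i for i, c in enumerate(s) if c != '#'), len(s)): index of first non-'#' char, len(s) if none
def pvLevelB (s : String) : Nat := s.toList.findIdx (fun c => !(c == '#'))

-- the single pass: prev = level of the last header seen, seen = meaningful content since it
def pvScan (o : Int) : List String → Option Nat → Bool → Int
  | [], _, _ => o
  | line :: rest, prev, seen =>
    let s := PySem.Str.strip line
    if PySem.Str.startswith s "#" then
      let lvl := pvLevelB s
      match prev with
      | some p =>
        if !seen && decide (p < lvl) && decide ((p : Int) = o - 1) then (p : Int)
        else pvScan o rest (some lvl) false
      | none => pvScan o rest (some lvl) false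
    else pvScan o rest prev (seen || pvMeaningB s)

def get_effective_chunk_level_py_alt (chunk : List (String × String)) (original_level : Int) (hierarchy : List Int) : Int :=
  if original_level ≤ 1 then original_level
  else
    pvScan original_level
      ((PySem.Str.split? ((pvLookup chunk "content").getD "") "\n").getD [])
      none false

-- ===== PRECONDITION & SPEC =====
-- Pre_ excludes only the inputs where Python A raises KeyError: original_level > 1 with no 'content' key.
def Pre_get_effective_chunk_level_py (chunk : List (String × String)) (original_level : Int) (hierarchy : List Int) : Prop :=
  original_level ≤ 1 ∨ (chunk.any (fun kv => kv.1 == "content")) = true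
instance (chunk : List (String × String)) (original_level : Int) (hierarchy : List Int) : Decidable (Pre_get_effective_chunk_level_py chunk original_level hierarchy) := by unfold Pre_get_effective_chunk_level_py; infer_instance

def pvWitness_get_effective_chunk_level_py : (List (String × String)) × Int × List Int :=
  ([("content", "## a\n### b")], 3, [])

def Spec_get_effective_chunk_level_py (chunk : List (String × String)) (original_level : Int) (hierarchy : List Int) (out : Int) : Prop := out = get_effective_chunk_level_py_alt chunk original_level hierarchy
instance (chunk : List (String × String)) (original_level : Int) (hierarchy : List Int) (out : Int) : Decidable (Spec_get_effective_chunk_level_py chunk original_level hierarchy out) := by unfold Spec_get_effective_chunk_level_py; infer_instance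

-- ===== CLAIM (what is proved, stated in full; the proofs are below) =====
def Claim_equal_get_effective_chunk_level_py : Prop := ∀ (chunk : List (String × String)) (original_level : Int) (hierarchy : List Int), Dom_get_effective_chunk_level_py chunk original_level hierarchy → Pre_get_effective_chunk_level_py chunk original_level hierarchy → Spec_get_effective_chunk_level_py chunk original_level hierarchy (get_effective_chunk_level_py chunk original_level hierarchy)

-- ===== LEMMAS AND PROOFS =====

-- B's first-non-'#' index is A's leading-'#' run length
theorem pvLevelB_eq (s : String) : pvLevelB s = pvLvlA s := by
  unfold pvLevelB pvLvlA
  induction s.toList with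
  | nil => rfl
  | cons c cs ih =>
    simp only [List.findIdx_cons, List.takeWhile_cons]
    cases hc : c == '#'
    · simp
    · simp [ih]

-- A's meaningful test (with its redundant repeated check) is B's test on the stripped line
theorem pvMeaning_eq (line : String) :
    pvMeaningA line = pvMeaningB (PySem.Str.strip line) := by
  unfold pvMeaningA pvMeaningB
  cases h : (PySem.Str.strip line != "") <;> simp [h]

theorem pvHasMeaningful_self (lines : List String) (a : Nat) :
    pvHasMeaningful lines a a = false := by
  simp [pvHasMeaningful]

theorem pvHasMeaningful_succ (lines : List String) (a b : Nat) (hab : a ≤ b) :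
    pvHasMeaningful lines a (b + 1)
      = (pvHasMeaningful lines a b
          || (decide (b < lines.length) && pvMeaningA (lines.getD b ""))) := by
  unfold pvHasMeaningful
  have h1 : b + 1 - a = (b - a) + 1 := by omega
  have h2 : a + 1 * (b - a) = b := by omega
  rw [h1, List.range'_concat, List.any_append, h2]
  simp

theorem pvPairLoop_short (lines : List String) (o : Int)
    (hs : List (Nat × String × Nat)) (h : hs.length ≤ 1) :
    pvPairLoop lines o hs = o := by
  match hs with
  | [] => rfl
  | [x] => rfl
  | x :: y :: rest => simp at h

-- the single-pass invariant: with pending header st (level, text, index) from the already-scanned prefix,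
-- the pair loop on st followed by the headers of the unscanned suffix equals the scan of the suffix
theorem pvScan_header_none (o : Int) (line : String) (rest : List String) (seen : Bool)
    (hh : PySem.Str.startswith (PySem.Str.strip line) "#" = true) :
    pvScan o (line :: rest) none seen
      = pvScan o rest (some (pvLevelB (PySem.Str.strip line))) false := by
  simp only [pvScan]
  rw [if_pos hh]

theorem pvScan_header_some (o : Int) (line : String) (rest : List String) (p : Nat) (seen : Bool)
    (hh : PySem.Str.startswith (PySem.Str.strip line) "#" = true) :
    pvScan o (line :: rest) (some p) seen
      = (if !seen && decide (p < pvLevelB (PySem.Str.strip line)) && decide ((p : Int) = o - 1)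
         then (p : Int) else pvScan o rest (some (pvLevelB (PySem.Str.strip line))) false) := by
  simp only [pvScan]
  rw [if_pos hh]

theorem pvScan_nonheader (o : Int) (line : String) (rest : List String)
    (prev : Option Nat) (seen : Bool)
    (hh : ¬ PySem.Str.startswith (PySem.Str.strip line) "#" = true) :
    pvScan o (line :: rest) prev seen
      = pvScan o rest prev (seen || pvMeaningB (PySem.Str.strip line)) := by
  cases prev <;> (simp only [pvScan]; rw [if_neg hh])

theorem pvCollect_header (i0 : Nat) (line : String) (rest : List String)
    (hh : PySem.Str.startswith (PySem.Str.strip line) "#" = true) :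
    pvCollect i0 (line :: rest)
      = (pvLvlA (PySem.Str.strip line), pvTxtA (PySem.Str.strip line), i0)
          :: pvCollect (i0 + 1) rest := by
  simp only [pvCollect]
  rw [if_pos hh]

theorem pvCollect_nonheader (i0 : Nat) (line : String) (rest : List String)
    (hh : ¬ PySem.Str.startswith (PySem.Str.strip line) "#" = true) :
    pvCollect i0 (line :: rest) = pvCollect (i0 + 1) rest := by
  simp only [pvCollect]
  rw [if_neg hh]

-- the single-pass invariant: with pending header st (level, text, index) from the already-scanned prefix,
-- the pair loop on st followed by the headers of the unscanned suffix equals the scan of the suffix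
set_option maxHeartbeats 1000000 in
theorem pvMain (suffix : List String) : ∀ (full : List String) (i0 : Nat) (o : Int)
    (st : Option (Nat × String × Nat)) (seen : Bool),
    List.drop i0 full = suffix →
    (match st with
     | none => True
     | some (_, _, j) => j + 1 ≤ i0 ∧ pvHasMeaningful full (j + 1) i0 = seen) →
    pvPairLoop full o (st.toList ++ pvCollect i0 suffix)
      = pvScan o suffix (st.map (fun x => x.1)) seen := by
  induction suffix with
  | nil =>
    intro full i0 o st seen _ _
    cases st <;> rfl
  | cons line rest pvMain_ih =>
    intro full i0 o st seen hdrop hst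
    have hget : full[i0]? = some line := by
      have h0 : (List.drop i0 full)[0]? = full[i0 + 0]? := List.getElem?_drop
      rw [hdrop] at h0; simpa using h0.symm
    have hlen : i0 < full.length := (List.getElem?_eq_some_iff.mp hget).1
    have hgetD : full.getD i0 "" = line := by simp [List.getD, hget]
    have hdrop' : List.drop (i0 + 1) full = rest := by
      have h1 : (List.drop i0 full).tail = List.drop (i0 + 1) full := List.tail_drop ..
      rw [← h1, hdrop]; rfl
    by_cases hh : PySem.Str.startswith (PySem.Str.strip line) "#" = true
    · -- header line
      have hnew : (i0 : Nat) + 1 ≤ i0 + 1 ∧ pvHasMeaningful full (i0 + 1) (i0 + 1) = false :=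
        ⟨by omega, pvHasMeaningful_self full (i0 + 1)⟩
      have hih := pvMain_ih full (i0 + 1) o
        (some (pvLvlA (PySem.Str.strip line), pvTxtA (PySem.Str.strip line), i0)) false hdrop' hnew
      simp only [Option.toList, Option.map, List.singleton_append] at hih
      rw [pvCollect_header i0 line rest hh]
      cases st with
      | none =>
        simp only [Option.toList, Option.map, List.nil_append]
        rw [pvScan_header_none o line rest seen hh, pvLevelB_eq]
        exact hih
      | some stv =>
        obtain ⟨p, t, j⟩ := stv
        obtain ⟨hji, hseen⟩ := hst
        simp only [Option.toList, Option.map, List.cons_append, List.nil_append]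
        rw [pvScan_header_some o line rest p seen hh, pvLevelB_eq]
        rw [show pvPairLoop full o ((p, t, j)
              :: (pvLvlA (PySem.Str.strip line), pvTxtA (PySem.Str.strip line), i0)
              :: pvCollect (i0 + 1) rest)
            = (if !(pvHasMeaningful full (j + 1) i0)
                  && decide (p < pvLvlA (PySem.Str.strip line)) && decide ((p : Int) = o - 1)
               then (p : Int)
               else pvPairLoop full o
                 ((pvLvlA (PySem.Str.strip line), pvTxtA (PySem.Str.strip line), i0)
                   :: pvCollect (i0 + 1) rest)) from rfl]
        rw [hseen]
        by_cases hc : (!seen && decide (p < pvLvlA (PySem.Str.strip line))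
            && decide ((p : Int) = o - 1)) = true
        · rw [if_pos hc, if_pos hc]
        · rw [if_neg hc, if_neg hc]
          exact hih
    · -- non-header line
      rw [pvCollect_nonheader i0 line rest hh]
      cases st with
      | none =>
        rw [pvScan_nonheader o line rest _ seen hh]
        exact pvMain_ih full (i0 + 1) o none _ hdrop' trivial
      | some stv =>
        obtain ⟨p, t, j⟩ := stv
        obtain ⟨hji, hseen⟩ := hst
        rw [pvScan_nonheader o line rest _ seen hh]
        refine pvMain_ih full (i0 + 1) o (some (p, t, j)) _ hdrop' ?_
        refine ⟨by omega, ?_⟩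
        rw [pvHasMeaningful_succ full (j + 1) i0 hji, hseen, hgetD,
            pvMeaning_eq, decide_eq_true hlen]
        simp

-- ===== VERDICT (by name: the statement is the Claim_ definition above) =====
theorem get_effective_chunk_level_py_spec : Claim_equal_get_effective_chunk_level_py := by
  intro chunk o hier _ _
  unfold Spec_get_effective_chunk_level_py get_effective_chunk_level_py get_effective_chunk_level_py_alt
  by_cases ho : o ≤ 1
  · simp [ho]
  · rw [if_neg ho, if_neg ho]
    set lines := (PySem.Str.split? ((pvLookup chunk "content").getD "") "\n").getD [] with hl
    have hmain := pvMain lines lines 0 o none false (by simp) trivial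
    simp only [Option.toList, List.nil_append, Option.map] at hmain
    by_cases hlen : (pvCollect 0 lines).length ≤ 1
    · rw [if_pos hlen, ← hmain, pvPairLoop_short _ _ _ hlen]
    · rw [if_neg hlen, hmain]
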